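-- pv_equiv track=rewrite | github.com/BUPT-ANTlab/REG-TSC | traffic_simulation/utils.py | select_phase_with_max_queue
-- ===== SOURCE A (Python) =====
-- def select_phase_with_max_queue(phase_queue_lengths):
--     #计算每个相位的最大排队长度
--     phase_max_queues = {
--         phase: max(queues.values(), default=0)  # 处理空字典
--         for phase, queues in phase_queue_lengths.items()
--     }
--
--     #找到全局最大排队长度
--     max_queue = max(phase_max_queues.values())
--
--     # 找出所有具有最大值的相位
--     candidate_phases = [
--         phase
--         for phase, q in phase_max_queues.items()
--         if q == max_queue
--     ]
--
--     selected_phase = min(candidate_phases)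
--
--     return selected_phase
-- ===== SOURCE B (Python) =====
-- def select_phase_with_max_queue(phase_queue_lengths):
--     best = None  # (best_q, best_phase)
--     for phase, queues in phase_queue_lengths.items():
--         q = max(queues.values(), default=0)
--         if best is None or q > best[0] or (q == best[0] and phase < best[1]):
--             best = (q, phase)
--     if best is None:
--         raise ValueError("empty phase_queue_lengths")
--     return best[1]
-- ===== Notes on version B (the rewrite author's own statement) =====
-- stated objective: simpler
-- what changed: Replaced the build-a-max-table-then-three-scans structure (dict comprehension, max over values, filter candidates, min) by a single pass that keeps a running (best_q, best_phase) and never materialises the intermediate dict.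
import Mathlib
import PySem

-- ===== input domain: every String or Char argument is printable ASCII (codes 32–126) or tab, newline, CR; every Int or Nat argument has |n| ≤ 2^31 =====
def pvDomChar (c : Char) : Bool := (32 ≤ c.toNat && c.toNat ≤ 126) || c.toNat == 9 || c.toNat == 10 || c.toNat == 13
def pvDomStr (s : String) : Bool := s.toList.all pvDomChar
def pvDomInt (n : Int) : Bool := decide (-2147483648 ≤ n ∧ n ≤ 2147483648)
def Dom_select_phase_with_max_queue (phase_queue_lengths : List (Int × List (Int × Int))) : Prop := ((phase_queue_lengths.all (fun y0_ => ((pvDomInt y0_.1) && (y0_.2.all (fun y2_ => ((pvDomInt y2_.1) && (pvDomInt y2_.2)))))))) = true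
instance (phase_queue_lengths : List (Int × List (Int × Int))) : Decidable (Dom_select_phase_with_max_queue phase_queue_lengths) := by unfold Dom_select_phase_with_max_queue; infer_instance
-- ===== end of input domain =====

-- B replaces A's table-then-three-scans structure (build phase→max dict, max of values,
-- filter candidates, min) by one pass keeping a running (best_q, best_phase): simpler.

-- shared helper: `max(queues.values(), default=0)` (appears verbatim in both Pythons)
def pyMaxD0 (queues : List (Int × Int)) : Int :=
  (PySem.List.max? (PySem.Dict.ofList queues).values (fun v => v)).getD 0

-- ===== PORT A =====
def select_phase_with_max_queue (phase_queue_lengths : List (Int × List (Int × Int))) : Int :=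
  let phase_max_queues : PySem.Dict Int Int :=
    phase_queue_lengths.foldl (fun d pq => d.insert pq.1 (pyMaxD0 pq.2)) PySem.Dict.empty
  let max_queue : Int := (PySem.List.max? phase_max_queues.values (fun v => v)).getD 0
  let candidate_phases : List Int :=
    (phase_max_queues.items.filter (fun pq => pq.2 == max_queue)).map Prod.fst
  (PySem.List.min? candidate_phases (fun v => v)).getD 0

-- ===== PORT B =====
-- the body of Source B's for-loop: update the running best (None until the first item)
def spmqStep (best : Option (Int × Int)) (pq : Int × List (Int × Int)) : Option (Int × Int) :=
  let q := pyMaxD0 pq.2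
  match best with
  | none => some (q, pq.1)
  | some (bq, bp) => if bq < q ∨ (q = bq ∧ pq.1 < bp) then some (q, pq.1) else some (bq, bp)

def select_phase_with_max_queue_alt (phase_queue_lengths : List (Int × List (Int × Int))) : Int :=
  match phase_queue_lengths.foldl spmqStep none with
  | some (_, bp) => bp
  | none => 0  -- unreachable under Pre_: Source B raises ValueError on the empty dict

-- ===== PRECONDITION & SPEC =====
-- Pre_ excludes (i) the empty dict, on which both Pythons raise ValueError, and
-- (ii) association lists with duplicate outer keys, which do not represent a Python
-- dict (dict construction merges them before either function ever runs).
def Pre_select_phase_with_max_queue (phase_queue_lengths : List (Int × List (Int × Int))) : Prop :=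
  phase_queue_lengths ≠ [] ∧ (phase_queue_lengths.map Prod.fst).Nodup
instance (phase_queue_lengths : List (Int × List (Int × Int))) : Decidable (Pre_select_phase_with_max_queue phase_queue_lengths) := by unfold Pre_select_phase_with_max_queue; infer_instance

def pvWitness_select_phase_with_max_queue : (List (Int × List (Int × Int))) := [(1, [(0, 3)]), (0, [])]

def Spec_select_phase_with_max_queue (phase_queue_lengths : List (Int × List (Int × Int))) (out : Int) : Prop := out = select_phase_with_max_queue_alt phase_queue_lengths
instance (phase_queue_lengths : List (Int × List (Int × Int))) (out : Int) : Decidable (Spec_select_phase_with_max_queue phase_queue_lengths out) := by unfold Spec_select_phase_with_max_queue; infer_instance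

-- ===== CLAIM (what is proved, stated in full; the proofs are below) =====
def Claim_equal_select_phase_with_max_queue : Prop := ∀ (phase_queue_lengths : List (Int × List (Int × Int))), Dom_select_phase_with_max_queue phase_queue_lengths → Pre_select_phase_with_max_queue phase_queue_lengths → Spec_select_phase_with_max_queue phase_queue_lengths (select_phase_with_max_queue phase_queue_lengths)

-- ===== LEMMAS AND PROOFS =====

-- proof-only: the (phase, qmax) pair each port derives from one dict item
def spmqPair (pq : Int × List (Int × Int)) : Int × Int := (pq.1, pyMaxD0 pq.2)

-- proof-only: B's loop body acting on precomputed (phase, qmax) pairs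
def spmqPairStep (best : Option (Int × Int)) (y : Int × Int) : Option (Int × Int) :=
  match best with
  | none => some (y.2, y.1)
  | some (bq, bp) => if bq < y.2 ∨ (y.2 = bq ∧ y.1 < bp) then some (y.2, y.1) else some (bq, bp)

-- proof-only: B's loop body once the best is initialised (best is never None again)
def spmqStep2 (b : Int × Int) (y : Int × Int) : Int × Int :=
  if b.1 < y.2 ∨ (y.2 = b.1 ∧ y.1 < b.2) then (y.2, y.1) else b

lemma foldl_spmqStep_eq_pairs (xs : List (Int × List (Int × Int))) (acc : Option (Int × Int)) :
    xs.foldl spmqStep acc = (xs.map spmqPair).foldl spmqPairStep acc := by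
  rw [List.foldl_map]
  induction xs generalizing acc with
  | nil => rfl
  | cons x t ih => simp only [List.foldl_cons, ih]; rfl

lemma foldl_spmqPairStep_some (t : List (Int × Int)) :
    ∀ b : Int × Int, t.foldl spmqPairStep (some b) = some (t.foldl spmqStep2 b) := by
  induction t with
  | nil => intro b; rfl
  | cons y t ih =>
      intro b
      simp only [List.foldl_cons, spmqPairStep, spmqStep2]
      split_ifs <;> exact ih _

-- the running-best invariant of B's loop
lemma spmqStep2_inv (t : List (ℤ × ℤ)) :
    ∀ b : ℤ × ℤ,
      ((t.foldl spmqStep2 b) = b ∨ ((t.foldl spmqStep2 b).2, (t.foldl spmqStep2 b).1) ∈ t) ∧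
      b.1 ≤ (t.foldl spmqStep2 b).1 ∧
      (b.1 = (t.foldl spmqStep2 b).1 → (t.foldl spmqStep2 b).2 ≤ b.2) ∧
      (∀ y ∈ t, y.2 ≤ (t.foldl spmqStep2 b).1 ∧
        (y.2 = (t.foldl spmqStep2 b).1 → (t.foldl spmqStep2 b).2 ≤ y.1)) := by
  induction t with
  | nil => intro b; simp
  | cons y t ih =>
      intro b
      simp only [List.foldl_cons]
      obtain ⟨ihm, ihb1, ihb2, ihall⟩ := ih (spmqStep2 b y)
      set r := t.foldl spmqStep2 (spmqStep2 b y) with hr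
      by_cases hc : b.1 < y.2 ∨ (y.2 = b.1 ∧ y.1 < b.2)
      · have hby : spmqStep2 b y = (y.2, y.1) := by simp [spmqStep2, hc]
        rw [hby] at ihm ihb1 ihb2
        have hy2r : y.2 ≤ r.1 := ihb1
        refine ⟨?_, ?_, ?_, ?_⟩
        · rcases ihm with h | h
          · right; rw [h]; exact List.mem_cons_self
          · right; exact List.mem_cons_of_mem _ h
        · rcases hc with h | h
          · exact le_of_lt (lt_of_lt_of_le h hy2r)
          · exact h.1 ▸ hy2r
        · intro hbr
          rcases hc with h | h
          · omega
          · have := ihb2 (by omega)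
            simp only at this
            omega
        · intro z hz
          rcases List.mem_cons.1 hz with rfl | hz
          · exact ⟨hy2r, fun h => ihb2 h⟩
          · exact ihall z hz
      · have hby : spmqStep2 b y = b := by simp [spmqStep2, hc]
        rw [hby] at ihm ihb1 ihb2
        refine ⟨?_, ihb1, ihb2, ?_⟩
        · rcases ihm with h | h
          · left; exact h
          · right; exact List.mem_cons_of_mem _ h
        · intro z hz
          rcases List.mem_cons.1 hz with rfl | hz
          · have hzb : z.2 ≤ b.1 := by omega
            refine ⟨le_trans hzb ihb1, fun hzr => ?_⟩
            have hbr : b.1 = r.1 := le_antisymm ihb1 (by omega)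
            have h1 := ihb2 hbr
            have h2 : b.2 ≤ z.1 := by omega
            omega
          · exact ihall z hz

theorem select_phase_with_max_queue_spec : Claim_equal_select_phase_with_max_queue := by
  intro xs _ hpre
  obtain ⟨hne, hnodup⟩ := hpre
  unfold Spec_select_phase_with_max_queue
  -- A's dict of per-phase maxima is just the mapped list (keys are fresh and distinct)
  have hitems :
      (xs.foldl (fun d pq => d.insert pq.1 (pyMaxD0 pq.2)) PySem.Dict.empty).items
        = xs.map spmqPair := by
    have := PySem.Dict.items_foldl_insert_fresh xs Prod.fst (fun pq => pyMaxD0 pq.2)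
      PySem.Dict.empty (fun a _ => PySem.Dict.contains_empty a.1) hnodup
    simpa [spmqPair] using this
  obtain ⟨x, t, rfl⟩ := List.exists_cons_of_ne_nil hne
  set l : List (ℤ × ℤ) := (x :: t).map spmqPair with hl
  -- B's side: the fold once the best is initialised with the first item
  have hB : select_phase_with_max_queue_alt (x :: t)
      = ((t.map spmqPair).foldl spmqStep2 ((spmqPair x).2, (spmqPair x).1)).2 := by
    unfold select_phase_with_max_queue_alt
    rw [foldl_spmqStep_eq_pairs]
    simp only [List.map_cons, List.foldl_cons, spmqPairStep]
    rw [foldl_spmqPairStep_some]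
  set r := (t.map spmqPair).foldl spmqStep2 ((spmqPair x).2, (spmqPair x).1) with hrdef
  obtain ⟨hm, hb1, hb2, hall⟩ := spmqStep2_inv (t.map spmqPair) ((spmqPair x).2, (spmqPair x).1)
  rw [← hrdef] at hm hb1 hb2 hall
  -- A's side normalisation
  unfold select_phase_with_max_queue
  simp only [hitems, PySem.Dict.values]
  -- the global maximum
  have hlne : List.map (fun (z : ℤ × ℤ) => z.2) l ≠ [] := by simp [hl]
  obtain ⟨m, hmax⟩ : ∃ m, PySem.List.max? (List.map (fun (z : ℤ × ℤ) => z.2) l) (fun v => v) = some m := by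
    cases hmx : PySem.List.max? (List.map (fun (z : ℤ × ℤ) => z.2) l) (fun v => v) with
    | none => exact absurd ((PySem.List.max?_eq_none_iff _ _).1 hmx) hlne
    | some m => exact ⟨m, rfl⟩
  -- r.1 is that maximum
  have hrl : (r.2, r.1) ∈ l := by
    rcases hm with h | h
    · rw [h]; simp only [hl, List.map_cons]
      exact List.mem_cons_self
    · simp only [hl, List.map_cons]; exact List.mem_cons_of_mem _ h
  have hr1mem : r.1 ∈ List.map (fun (z : ℤ × ℤ) => z.2) l :=
    List.mem_map.2 ⟨(r.2, r.1), hrl, rfl⟩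
  have hr1dom : ∀ z ∈ List.map (fun (z : ℤ × ℤ) => z.2) l, z ≤ r.1 := by
    intro z hz
    obtain ⟨y, hy, rfl⟩ := List.mem_map.1 hz
    rcases (by simpa [hl] using hy : y = spmqPair x ∨ y ∈ t.map spmqPair) with rfl | hyt
    · simpa using hb1
    · exact (hall y hyt).1
  have hmr : m = r.1 :=
    le_antisymm (hr1dom m (PySem.List.max?_mem hmax)) (PySem.List.max?_isMax hmax r.1 hr1mem)
  -- candidates and their minimum
  have hrc : r.2 ∈ (l.filter (fun pq => pq.2 == m)).map Prod.fst := by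
    refine List.mem_map.2 ⟨(r.2, r.1), List.mem_filter.2 ⟨hrl, ?_⟩, rfl⟩
    simp [hmr]
  obtain ⟨mn, hmin⟩ : ∃ mn,
      PySem.List.min? ((l.filter (fun pq => pq.2 == m)).map Prod.fst) (fun v => v) = some mn := by
    cases hmn : PySem.List.min? ((l.filter (fun pq => pq.2 == m)).map Prod.fst) (fun v => v) with
    | none => exact absurd ((PySem.List.min?_eq_none_iff _ _).1 hmn ▸ hrc) (List.not_mem_nil)
    | some mn => exact ⟨mn, rfl⟩
  have hmnle : mn ≤ r.2 := PySem.List.min?_isMin hmin r.2 hrc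
  have hlemn : r.2 ≤ mn := by
    obtain ⟨y, hy, rfl⟩ := List.mem_map.1 (PySem.List.min?_mem hmin)
    obtain ⟨hyl, hyq⟩ := List.mem_filter.1 hy
    have hy2 : y.2 = r.1 := by simpa [hmr] using hyq
    rcases (by simpa [hl] using hyl : y = spmqPair x ∨ y ∈ t.map spmqPair) with rfl | hyt
    · exact hb2 hy2
    · exact (hall y hyt).2 hy2
  rw [hmax]
  simp only [Option.getD_some]
  rw [hmin, hB]
  simpa using le_antisymm hmnle hlemn
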